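-- pv_equiv track=rewrite | github.com/logicalpath/photomanage | src/convert_vidres_tocsv.py | parse_input_text
-- ===== SOURCE A (Python) =====
-- def parse_input_text(input_text):
--     lines = input_text.strip().split("\n")
--     file_info = []
--     current_info = {}
--     for line in lines:
--         if line.startswith("File:"):
--             if current_info:
--                 file_info.append(current_info)
--                 current_info = {}
--             current_info["File"] = line.split(":", 1)[1].strip()
--         elif line.startswith("width="):
--             current_info["Width"] = line.split("=", 1)[1].strip()
--         elif line.startswith("height="):
--             current_info["Height"] = line.split("=", 1)[1].strip()
--     if current_info:
--         file_info.append(current_info)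
--     return file_info
-- ===== SOURCE B (Python) =====
-- def _parse_line(line):
--     if line.startswith("File:"):
--         return ("File", line.split(":", 1)[1].strip())
--     if line.startswith("width="):
--         return ("Width", line.split("=", 1)[1].strip())
--     if line.startswith("height="):
--         return ("Height", line.split("=", 1)[1].strip())
--     return None
--
-- def parse_input_text(input_text):
--     # pass 1: partition the lines into blocks, a new block at each "File:" line
--     blocks, cur = [], []
--     for line in input_text.strip().split("\n"):
--         if line.startswith("File:"):
--             blocks.append(cur)
--             cur = [line]
--         else:
--             cur.append(line)
--     blocks.append(cur)
--     # pass 2: map each block to its dict, keep the non-empty ones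
--     dicts = (dict(p for p in map(_parse_line, block) if p is not None) for block in blocks)
--     return [d for d in dicts if d]
-- ===== Notes on version B (the rewrite author's own statement) =====
-- stated objective: alternative
-- what changed: Replaces A's single stateful loop (accumulator dict with flush-on-'File:' and a trailing flush) by a two-pass decomposition: first partition the lines into blocks starting at each 'File:' line (leading lines form an initial block), then map each block independently to its dict and keep the non-empty ones.
import Mathlib
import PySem

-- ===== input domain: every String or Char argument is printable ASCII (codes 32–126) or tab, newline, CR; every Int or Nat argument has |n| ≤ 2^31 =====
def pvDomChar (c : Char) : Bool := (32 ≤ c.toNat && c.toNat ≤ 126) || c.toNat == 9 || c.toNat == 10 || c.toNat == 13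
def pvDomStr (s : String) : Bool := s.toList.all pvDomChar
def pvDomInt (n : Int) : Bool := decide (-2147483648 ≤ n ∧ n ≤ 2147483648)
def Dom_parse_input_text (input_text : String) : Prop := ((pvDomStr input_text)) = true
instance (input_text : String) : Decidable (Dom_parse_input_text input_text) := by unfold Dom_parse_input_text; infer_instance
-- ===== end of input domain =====

-- B replaces A's single stateful accumulator-with-flush loop by a two-pass decomposition
-- (partition lines into blocks at "File:" lines, then map each block independently to its dict);
-- objective: alternative decomposition, same cost.

-- ===== PORT A =====
-- A's loop body; `line.split(sep, 1)[1]` is total on the guarded branches (the separator is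
-- present because the line starts with "File:"/"width="/"height="), so `.getD` is exact there.
def pvStepA (st : List (PySem.Dict String String) × PySem.Dict String String) (line : String) :
    List (PySem.Dict String String) × PySem.Dict String String :=
  if PySem.Str.startswith line "File:" then
    let st := if st.2.items = [] then st else (st.1 ++ [st.2], PySem.Dict.empty)
    (st.1, st.2.insert "File" (PySem.Str.strip (((PySem.Str.splitMax? line ":" 1).getD []).getD 1 "")))
  else if PySem.Str.startswith line "width=" then
    (st.1, st.2.insert "Width" (PySem.Str.strip (((PySem.Str.splitMax? line "=" 1).getD []).getD 1 "")))
  else if PySem.Str.startswith line "height=" then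
    (st.1, st.2.insert "Height" (PySem.Str.strip (((PySem.Str.splitMax? line "=" 1).getD []).getD 1 "")))
  else st

def parse_input_text (input_text : String) : List (List (String × String)) :=
  let lines := (PySem.Str.split? (PySem.Str.strip input_text) "\n").getD []
  let st := lines.foldl pvStepA ([], PySem.Dict.empty)
  (if st.2.items = [] then st.1 else st.1 ++ [st.2]).map (·.items)

-- ===== PORT B =====
def pvParseLine (line : String) : Option (String × String) :=
  if PySem.Str.startswith line "File:" then
    some ("File", PySem.Str.strip (((PySem.Str.splitMax? line ":" 1).getD []).getD 1 ""))
  else if PySem.Str.startswith line "width=" then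
    some ("Width", PySem.Str.strip (((PySem.Str.splitMax? line "=" 1).getD []).getD 1 ""))
  else if PySem.Str.startswith line "height=" then
    some ("Height", PySem.Str.strip (((PySem.Str.splitMax? line "=" 1).getD []).getD 1 ""))
  else none

-- pass 1 loop body: partition the lines into blocks, a new block at each "File:" line
def pvStepB (p : List (List String) × List String) (line : String) :
    List (List String) × List String :=
  if PySem.Str.startswith line "File:" then (p.1 ++ [p.2], [line]) else (p.1, p.2 ++ [line])

def parse_input_text_alt (input_text : String) : List (List (String × String)) :=
  let lines := (PySem.Str.split? (PySem.Str.strip input_text) "\n").getD []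
  let p := lines.foldl pvStepB ([], [])
  let blocks := p.1 ++ [p.2]
  -- pass 2: each block to its dict (dict(pairs) = insertion-order build), keep the non-empty ones
  ((blocks.map (fun b => PySem.Dict.ofList (b.filterMap pvParseLine))).filter
      (fun d => !d.items.isEmpty)).map (·.items)

-- ===== PRECONDITION & SPEC =====
def Spec_parse_input_text (input_text : String) (out : List (List (String × String))) : Prop := out = parse_input_text_alt input_text
instance (input_text : String) (out : List (List (String × String))) : Decidable (Spec_parse_input_text input_text out) := by unfold Spec_parse_input_text; infer_instance

-- ===== CLAIM (what is proved, stated in full; the proofs are below) =====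
def Claim_equal_parse_input_text : Prop := ∀ (input_text : String), Dom_parse_input_text input_text → Spec_parse_input_text input_text (parse_input_text input_text)

-- ===== LEMMAS AND PROOFS =====

-- apply one line to a running dict, exactly as A's non-flushing updates do
def pvApply (d : PySem.Dict String String) (line : String) : PySem.Dict String String :=
  match pvParseLine line with
  | some kv => d.insert kv.1 kv.2
  | none => d

def pvDFold (d : PySem.Dict String String) (ls : List String) : PySem.Dict String String :=
  ls.foldl pvApply d

def pvEmit (d : PySem.Dict String String) : List (PySem.Dict String String) :=
  if d.items = [] then [] else [d]

-- A's loop, restructured as a recursion on the remaining lines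
def pvG : PySem.Dict String String → List String → List (PySem.Dict String String)
  | d, [] => pvEmit d
  | d, l :: ls =>
      if PySem.Str.startswith l "File:" then pvEmit d ++ pvG (pvApply PySem.Dict.empty l) ls
      else pvG (pvApply d l) ls

-- B's pass 1, as a recursion on the remaining lines
def pvBlocksRec : List String → List String → List (List String)
  | cur, [] => [cur]
  | cur, l :: ls =>
      if PySem.Str.startswith l "File:" then cur :: pvBlocksRec [l] ls
      else pvBlocksRec (cur ++ [l]) ls

def pvFlat (d : PySem.Dict String String) : List (List String) → List (PySem.Dict String String)
  | [] => []
  | b :: bs => pvEmit (pvDFold d b) ++ bs.flatMap (fun b => pvEmit (pvDFold PySem.Dict.empty b))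

theorem pvDict_eq_empty_of_items_nil (d : PySem.Dict String String) (h : d.items = []) :
    d = PySem.Dict.empty := by
  apply PySem.Dict.ext; simpa using h

theorem pvA_loop (ls : List String) : ∀ (acc : List (PySem.Dict String String)) d,
    (if (ls.foldl pvStepA (acc, d)).2.items = [] then (ls.foldl pvStepA (acc, d)).1
     else (ls.foldl pvStepA (acc, d)).1 ++ [(ls.foldl pvStepA (acc, d)).2]) = acc ++ pvG d ls := by
  induction ls with
  | nil =>
      intro acc d
      simp only [List.foldl_nil, pvG, pvEmit]
      split_ifs <;> simp
  | cons l ls ih =>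
      intro acc d
      simp only [List.foldl_cons, pvG]
      by_cases hf : PySem.Str.startswith l "File:"
      · have hstep : pvStepA (acc, d) l =
            ((if d.items = [] then acc else acc ++ [d]),
             (if d.items = [] then d else PySem.Dict.empty).insert "File"
               (PySem.Str.strip (((PySem.Str.splitMax? l ":" 1).getD []).getD 1 ""))) := by
          unfold pvStepA
          rw [if_pos hf]
          split_ifs <;> rfl
        have hp : pvParseLine l = some ("File",
            PySem.Str.strip (((PySem.Str.splitMax? l ":" 1).getD []).getD 1 "")) := by
          unfold pvParseLine; rw [if_pos hf]
        have happ : pvApply PySem.Dict.empty l =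
            PySem.Dict.empty.insert "File"
              (PySem.Str.strip (((PySem.Str.splitMax? l ":" 1).getD []).getD 1 "")) := by
          unfold pvApply; rw [hp]
        rw [hstep, ih, if_pos hf, happ]
        by_cases hd : d.items = []
        · rw [pvDict_eq_empty_of_items_nil d hd]
          have he : (PySem.Dict.empty : PySem.Dict String String).items = [] := rfl
          simp [pvEmit, he]
        · simp [pvEmit, hd, List.append_assoc]
      · by_cases hw : PySem.Str.startswith l "width="
        · have hp : pvParseLine l = some ("Width",
              PySem.Str.strip (((PySem.Str.splitMax? l "=" 1).getD []).getD 1 "")) := by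
            unfold pvParseLine; rw [if_neg hf, if_pos hw]
          have hstep : pvStepA (acc, d) l = (acc, pvApply d l) := by
            unfold pvStepA pvApply
            rw [if_neg hf, if_pos hw, hp]
          rw [hstep, ih, if_neg hf]
        · by_cases hh : PySem.Str.startswith l "height="
          · have hp : pvParseLine l = some ("Height",
                PySem.Str.strip (((PySem.Str.splitMax? l "=" 1).getD []).getD 1 "")) := by
              unfold pvParseLine; rw [if_neg hf, if_neg hw, if_pos hh]
            have hstep : pvStepA (acc, d) l = (acc, pvApply d l) := by
              unfold pvStepA pvApply
              rw [if_neg hf, if_neg hw, if_pos hh, hp]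
            rw [hstep, ih, if_neg hf]
          · have hp : pvParseLine l = none := by
              unfold pvParseLine; rw [if_neg hf, if_neg hw, if_neg hh]
            have hstep : pvStepA (acc, d) l = (acc, pvApply d l) := by
              unfold pvStepA pvApply
              rw [if_neg hf, if_neg hw, if_neg hh, hp]
            rw [hstep, ih, if_neg hf]

theorem pvB_loop (ls : List String) : ∀ (bs : List (List String)) cur,
    (ls.foldl pvStepB (bs, cur)).1 ++ [(ls.foldl pvStepB (bs, cur)).2] = bs ++ pvBlocksRec cur ls := by
  induction ls with
  | nil => intro bs cur; simp [pvBlocksRec]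
  | cons l ls ih =>
      intro bs cur
      simp only [List.foldl_cons, pvBlocksRec, pvStepB]
      by_cases hf : PySem.Str.startswith l "File:"
      · simp only [hf, if_pos]
        rw [ih]; simp
      · simp only [hf, if_neg, Bool.false_eq_true, not_false_iff]
        rw [ih]

theorem pvFlat_empty (bs : List (List String)) :
    pvFlat PySem.Dict.empty bs = bs.flatMap (fun b => pvEmit (pvDFold PySem.Dict.empty b)) := by
  cases bs <;> simp [pvFlat]

theorem pvG_blocks (ls : List String) : ∀ (cur : List String) d,
    pvG (pvDFold d cur) ls = pvFlat d (pvBlocksRec cur ls) := by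
  induction ls with
  | nil => intro cur d; simp [pvG, pvBlocksRec, pvFlat]
  | cons l ls ih =>
      intro cur d
      simp only [pvG, pvBlocksRec]
      by_cases hf : PySem.Str.startswith l "File:"
      · simp only [hf, if_pos]
        have : pvApply PySem.Dict.empty l = pvDFold PySem.Dict.empty [l] := by
          simp [pvDFold, pvApply]
        rw [this, ih [l] PySem.Dict.empty, pvFlat, pvFlat_empty]
      · simp only [hf, if_neg, Bool.false_eq_true, not_false_iff]
        have : pvApply (pvDFold d cur) l = pvDFold d (cur ++ [l]) := by
          simp [pvDFold]
        rw [this, ih (cur ++ [l]) d]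

theorem pvOfList_filterMap (ls : List String) : ∀ d,
    (ls.filterMap pvParseLine).foldl (fun d p => d.insert p.1 p.2) d = ls.foldl pvApply d := by
  induction ls with
  | nil => intro d; rfl
  | cons l ls ih =>
      intro d
      simp only [List.filterMap_cons, List.foldl_cons]
      cases h : pvParseLine l <;> simp [pvApply, h, ih]

theorem pvFilter_emit (f : List String → PySem.Dict String String) (bs : List (List String)) :
    (bs.map f).filter (fun d => !d.items.isEmpty) = bs.flatMap (fun b => pvEmit (f b)) := by
  induction bs with
  | nil => rfl
  | cons b bs ih =>
      simp only [List.map_cons, List.filter_cons, List.flatMap_cons]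
      rw [ih]
      by_cases h : (f b).items = [] <;> simp [pvEmit, h]

-- ===== VERDICT (by name: the statement is the Claim_ definition above) =====
theorem parse_input_text_spec : Claim_equal_parse_input_text := by
  intro input_text _
  unfold Spec_parse_input_text parse_input_text parse_input_text_alt
  simp only [pvA_loop _ [] PySem.Dict.empty, pvB_loop _ [] []]
  have h1 : pvG PySem.Dict.empty
      ((PySem.Str.split? (PySem.Str.strip input_text) "\n").getD []) =
      pvFlat PySem.Dict.empty
        (pvBlocksRec [] ((PySem.Str.split? (PySem.Str.strip input_text) "\n").getD [])) :=
    pvG_blocks ((PySem.Str.split? (PySem.Str.strip input_text) "\n").getD []) [] PySem.Dict.empty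
  have h2 : (fun b => pvEmit (PySem.Dict.ofList (b.filterMap pvParseLine))) =
      (fun b => pvEmit (pvDFold PySem.Dict.empty b)) :=
    funext fun b => by rw [show PySem.Dict.ofList (b.filterMap pvParseLine)
      = pvDFold PySem.Dict.empty b from pvOfList_filterMap b PySem.Dict.empty]
  rw [h1, pvFlat_empty, List.nil_append,
    pvFilter_emit (fun b => PySem.Dict.ofList (b.filterMap pvParseLine)), h2]
  simp
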